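-- pv_equiv track=rewrite | github.com/Ryles1/AdventofCode | 2022/day14.py | get_collision_row
-- ===== SOURCE A (Python) =====
-- AIR = '.'
--
-- def get_collision_row(m, sand, bottom):
--     col = sand[1]
--     collision_row = sand[0]
--     # check every row between the sand and the bottom
--     for row in range(collision_row, bottom):
--         if m[row][col] == AIR:
--             continue
--         # if location is not open, then there's a collision
--         else:
--             collision_row = row
--             return collision_row
--     # if no collision occurs, return None
--     return None
-- ===== SOURCE B (Python) =====
-- AIR = '.'
--
-- def get_collision_row(m, sand, bottom):
--     col = sand[1]
--     # stage 1: index every blocked row of the column's window, clamped to the grid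
--     blocked = [row for row in range(sand[0], min(bottom, len(m))) if m[row][col] != AIR]
--     # stage 2: the collision row is the least blocked row, if any
--     return min(blocked, default=None)
-- ===== Notes on version B (the rewrite author's own statement) =====
-- stated objective: alternative
-- what changed: A does an early-exit row-by-row search down the column; B stages the work: one comprehension indexes every blocked row in the grid-clamped window [sand[0], min(bottom, len(m))), then returns min(blocked, default=None).
-- outside the precondition, e.g. on get_collision_row([['#'], []], (0, 0), 2): A returns 0, B raises IndexError
import Mathlib
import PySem

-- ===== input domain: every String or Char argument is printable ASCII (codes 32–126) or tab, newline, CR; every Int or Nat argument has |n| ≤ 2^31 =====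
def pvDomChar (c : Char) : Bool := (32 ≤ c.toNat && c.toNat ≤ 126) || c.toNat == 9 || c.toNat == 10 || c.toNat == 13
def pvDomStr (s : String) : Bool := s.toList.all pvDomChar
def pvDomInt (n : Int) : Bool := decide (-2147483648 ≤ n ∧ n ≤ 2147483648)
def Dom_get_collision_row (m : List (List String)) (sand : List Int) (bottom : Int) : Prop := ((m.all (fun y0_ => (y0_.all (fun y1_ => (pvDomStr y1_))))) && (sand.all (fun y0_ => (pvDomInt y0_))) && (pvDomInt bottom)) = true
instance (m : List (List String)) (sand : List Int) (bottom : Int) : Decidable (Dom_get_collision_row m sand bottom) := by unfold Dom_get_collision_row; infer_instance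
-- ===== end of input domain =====

-- B replaces A's early-exit search by a staged pass: index every blocked row of the
-- grid-clamped window with a comprehension, then take min(blocked, default=None)
-- (objective: alternative; B also returns None where A runs past the last grid row).

-- ===== PORT A =====
-- A's for-loop over range(sand[0], bottom): fuel = number of remaining range elements;
-- 'continue' on air, early return on a hit, None when the range is exhausted;
-- none also on the IndexError path (excluded by Pre_).
def goA (m : List (List String)) (col : Int) : Nat → Int → Option Int
  | 0, _ => none
  | fuel + 1, row =>
    match (PySem.List.pyGet? m row).bind (fun line => PySem.List.pyGet? line col) with
    | some s => if s == "." then goA m col fuel (row + 1) else some row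
    | none => none

def get_collision_row (m : List (List String)) (sand : List Int) (bottom : Int) : Option Int :=
  match PySem.List.pyGet? sand 1 with
  | none => none
  | some col =>
    match PySem.List.pyGet? sand 0 with
    | none => none
    | some r0 => goA m col (bottom - r0).toNat r0

-- ===== PORT B =====
-- B's stage 1: the comprehension [row for row in range(sand[0], min(bottom, len(m))) if m[row][col] != AIR];
-- none = IndexError inside the comprehension (excluded by Pre_).
def buildBlocked (m : List (List String)) (col : Int) : List Int → Option (List Int)
  | [] => some []
  | r :: rs =>
    match (PySem.List.pyGet? m r).bind (fun line => PySem.List.pyGet? line col) with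
    | none => none
    | some s => (buildBlocked m col rs).map (fun t => if s == "." then t else r :: t)

-- B's stage 2: min(blocked, default=None) is PySem.List.min? with the identity key.
def get_collision_row_alt (m : List (List String)) (sand : List Int) (bottom : Int) : Option Int :=
  match PySem.List.pyGet? sand 1 with
  | none => none
  | some col =>
    match PySem.List.pyGet? sand 0 with
    | none => none
    | some r0 =>
      match buildBlocked m col (PySem.List.pyRange r0 (min bottom (m.length : Int)) 1) with
      | none => none
      | some blocked => PySem.List.min? blocked (fun x => x)

-- ===== PRECONDITION & SPEC =====
-- Pre_-only copy of the cell accessor m[row][col] (Pre_ must not share definitions with the ports)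
def pvCellPre (m : List (List String)) (row col : Int) : Option String :=
  (PySem.List.pyGet? m row).bind (fun line => PySem.List.pyGet? line col)

-- Pre_ excludes (a) inputs on which A raises IndexError: sand[0]/sand[1] missing, an invalid
-- m[row][col] met while scanning air, or an all-air window with bottom > len(m) (A walks past
-- the last row); and (b) inputs on which A returns but B raises: a window containing an
-- invalid m[row][col] AFTER A's first blocked cell — B's comprehension reads the whole
-- window [sand[0], min(bottom, len(m))), A stops at the first hit (see claim.json cites).
def preCheck (m : List (List String)) (sand : List Int) (bottom : Int) : Bool :=
  match PySem.List.pyGet? sand 1, PySem.List.pyGet? sand 0 with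
  | some col, some r0 =>
    if bottom ≤ r0 then true            -- empty scan: A returns None immediately
    else if r0 < -(m.length : Int) then false   -- A raises at its very first row access
    else
      (PySem.List.pyRange r0 (min bottom (m.length : Int)) 1).all
          (fun r => (pvCellPre m r col).isSome) &&
      !(decide ((m.length : Int) < bottom) &&
        (PySem.List.pyRange r0 (min bottom (m.length : Int)) 1).all
          (fun r => pvCellPre m r col == some "."))
  | _, _ => false

def Pre_get_collision_row (m : List (List String)) (sand : List Int) (bottom : Int) : Prop :=
  preCheck m sand bottom = true

instance (m : List (List String)) (sand : List Int) (bottom : Int) : Decidable (Pre_get_collision_row m sand bottom) := by unfold Pre_get_collision_row; infer_instance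

def pvWitness_get_collision_row : List (List String) × List Int × Int := ([[".", "."], [".", "#"]], [0, 1], 2)

def Spec_get_collision_row (m : List (List String)) (sand : List Int) (bottom : Int) (out : Option Int) : Prop := out = get_collision_row_alt m sand bottom
instance (m : List (List String)) (sand : List Int) (bottom : Int) (out : Option Int) : Decidable (Spec_get_collision_row m sand bottom out) := by unfold Spec_get_collision_row; infer_instance

-- ===== CLAIM (what is proved, stated in full; the proofs are below) =====
def Claim_equal_get_collision_row : Prop := ∀ (m : List (List String)) (sand : List Int) (bottom : Int), Dom_get_collision_row m sand bottom → Pre_get_collision_row m sand bottom → Spec_get_collision_row m sand bottom (get_collision_row m sand bottom)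

-- ===== LEMMAS AND PROOFS =====

-- the blocked-cell test B's comprehension filter performs
def pB (m : List (List String)) (col r : Int) : Bool := !(pvCellPre m r col == some ".")

-- A's fuel recursion is a structural scan of the list range(row, bottom)
def scanA (m : List (List String)) (col : Int) : List Int → Option Int
  | [] => none
  | r :: rs =>
    match pvCellPre m r col with
    | some s => if s == "." then scanA m col rs else some r
    | none => none

theorem goA_eq_scanA (m : List (List String)) (col bottom : Int) :
    ∀ (fuel : Nat) (row : Int), fuel = (bottom - row).toNat →
      goA m col fuel row = scanA m col (PySem.List.pyRange row bottom 1) := by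
  intro fuel
  induction fuel with
  | zero =>
    intro row h
    rw [PySem.List.pyRange_one_eq_nil (by omega)]
    rfl
  | succ n ih =>
    intro row h
    rw [PySem.List.pyRange_one_cons (by omega)]
    simp only [goA, scanA, pvCellPre]
    cases (PySem.List.pyGet? m row).bind (fun line => PySem.List.pyGet? line col) with
    | none => rfl
    | some s =>
      by_cases hs : s == "."
      · simp only [hs, if_pos]
        exact ih (row + 1) (by omega)
      · simp [hs]

-- stage 1 of B on a window whose cells are all valid: the comprehension is a filter
theorem buildBlocked_eq_filter (m : List (List String)) (col : Int) :
    ∀ (L : List Int), (∀ r ∈ L, (pvCellPre m r col).isSome) →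
      buildBlocked m col L = some (L.filter (pB m col)) := by
  intro L
  induction L with
  | nil => intro _; rfl
  | cons r rs ih =>
    intro hv
    have hr : (pvCellPre m r col).isSome := hv r (by simp)
    cases hc : pvCellPre m r col with
    | none => rw [hc] at hr; simp at hr
    | some s =>
      have hrest := ih (fun x hx => hv x (by simp [hx]))
      simp only [buildBlocked, List.filter_cons]
      have hc' : (PySem.List.pyGet? m r).bind (fun line => PySem.List.pyGet? line col) = some s := hc
      rw [hc', hrest]
      by_cases hs : s == "."
      · have : pB m col r = false := by simp [pB, hc, hs]
        simp [hs, this]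
      · have : pB m col r = true := by simp [pB, hc]; simpa using hs
        simp [hs, this]

-- A's scan over xs ++ ys: stops at the first blocked cell of xs if there is one
theorem scanA_append (m : List (List String)) (col : Int) :
    ∀ (xs ys : List Int), (∀ r ∈ xs, (pvCellPre m r col).isSome) →
      scanA m col (xs ++ ys) =
        match xs.filter (pB m col) with
        | [] => scanA m col ys
        | h :: _ => some h := by
  intro xs
  induction xs with
  | nil => intro ys _; rfl
  | cons r rs ih =>
    intro ys hv
    have hr : (pvCellPre m r col).isSome := hv r (by simp)
    cases hc : pvCellPre m r col with
    | none => rw [hc] at hr; simp at hr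
    | some s =>
      simp only [List.cons_append, scanA, hc, List.filter_cons]
      by_cases hs : s == "."
      · have : pB m col r = false := by simp [pB, hc, hs]
        simp only [hs, if_pos, this, Bool.false_eq_true, if_false]
        exact ih ys (fun x hx => hv x (by simp [hx]))
      · have : pB m col r = true := by simp [pB, hc]; simpa using hs
        simp [hs, this]

-- min with the identity key of a strictly sorted list is its head
theorem min?_id_sorted (l : List Int) (h : l.Pairwise (· ≤ ·)) :
    PySem.List.min? l (fun x => x) = l.head? := by
  cases l with
  | nil => simp [PySem.List.min?]
  | cons a t =>
    rw [PySem.List.min?_id_cons]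
    have hle : ∀ x ∈ t, a ≤ x := (List.pairwise_cons.mp h).1
    have : ∀ (t : List Int) (a : Int), (∀ x ∈ t, a ≤ x) → t.foldl min a = a := by
      intro t
      induction t with
      | nil => intro a _; rfl
      | cons b t ih =>
        intro a ha
        simp only [List.foldl_cons]
        rw [min_eq_left (ha b (by simp))]
        exact ih a (fun x hx => ha x (by simp [hx]))
    rw [this t a hle]
    rfl

-- ===== VERDICT (by name: the statement is the Claim_ definition above) =====
theorem get_collision_row_spec : Claim_equal_get_collision_row := by
  intro m sand bottom _ hpre
  unfold Spec_get_collision_row get_collision_row get_collision_row_alt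
  unfold Pre_get_collision_row preCheck at hpre
  cases h1 : PySem.List.pyGet? sand 1 with
  | none => rfl
  | some col =>
    cases h0 : PySem.List.pyGet? sand 0 with
    | none => rfl
    | some r0 =>
      rw [h1, h0] at hpre
      dsimp only at hpre ⊢
      by_cases hb : bottom ≤ r0
      · -- empty scan on both sides
        rw [goA_eq_scanA m col bottom (bottom - r0).toNat r0 rfl,
            PySem.List.pyRange_one_eq_nil hb,
            PySem.List.pyRange_one_eq_nil (show min bottom (m.length : Int) ≤ r0 by omega)]
        rfl
      · rw [if_neg hb] at hpre
        rw [not_le] at hb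
        by_cases hneg : r0 < -(m.length : Int)
        · rw [if_pos hneg] at hpre
          exact absurd hpre (by simp)
        · rw [if_neg hneg] at hpre
          rw [not_lt] at hneg
          simp only [Bool.and_eq_true, Bool.not_eq_true', Bool.and_eq_false_iff,
            List.all_eq_true, decide_eq_false_iff_not] at hpre
          obtain ⟨hv, hc⟩ := hpre
          have hWsorted : ((PySem.List.pyRange r0 (min bottom (m.length : Int)) 1).filter (pB m col)).Pairwise (· ≤ ·) :=
            ((PySem.List.pairwise_lt_pyRange_one r0 (min bottom (m.length : Int))).filter _).imp (fun h => le_of_lt h)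
          rw [goA_eq_scanA m col bottom (bottom - r0).toNat r0 rfl,
              buildBlocked_eq_filter m col _ hv]
          by_cases hlen : bottom ≤ (m.length : Int)
          · -- no clamping: the window is the whole range
            have hmin : min bottom (m.length : Int) = bottom := by omega
            rw [hmin] at hv hWsorted ⊢
            have := scanA_append m col (PySem.List.pyRange r0 bottom 1) [] hv
            rw [List.append_nil] at this
            rw [this]
            dsimp only
            rw [min?_id_sorted _ hWsorted]
            cases (PySem.List.pyRange r0 bottom 1).filter (pB m col) <;> rfl
          · -- clamped window; Pre_ rules out an all-air window here
            rw [not_le] at hlen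
            have hmin : min bottom (m.length : Int) = (m.length : Int) := by omega
            by_cases hr0 : (m.length : Int) < r0
            · -- window empty, all-air vacuously: contradiction with Pre_
              exfalso
              rcases hc with h | h
              · omega
              · rw [hmin, PySem.List.pyRange_one_eq_nil (by omega)] at h
                simp at h
            · rw [not_lt] at hr0
              -- split A's range at the clamp
              rw [PySem.List.pyRange_one_append r0 (min bottom (m.length : Int)) bottom (by omega) (by omega)]
              rw [scanA_append m col _ _ hv]
              dsimp only
              rw [min?_id_sorted _ hWsorted]
              -- Pre_ gives a blocked cell inside the window, so the tail is never reached
              cases hf : (PySem.List.pyRange r0 (min bottom (m.length : Int)) 1).filter (pB m col) with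
              | cons h t => rfl
              | nil =>
                exfalso
                rcases hc with h | h
                · omega
                · -- filter empty means every window cell is air, contradicting ¬ all-air
                  obtain ⟨r, hrmem, hrp⟩ := List.all_eq_false.mp h
                  have hpBr : pB m col r = true := by
                    unfold pB
                    rw [Bool.eq_false_iff.mpr hrp]
                    rfl
                  have hmemf := List.mem_filter.mpr ⟨hrmem, hpBr⟩
                  rw [hf] at hmemf
                  simp at hmemf
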